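-- pv_equiv track=rewrite | github.com/bellepoque7/programmers_python | 모의고사.py | solution
-- ===== SOURCE A (Python) =====
-- def solution(answers):
--     stu_1 = [1, 2, 3, 4, 5]
--     stu_2 = [2, 1, 2, 3, 2, 4, 2, 5]
--     stu_3 = [3, 3, 1, 1, 2, 2, 4, 4, 5, 5]
--
--     stu_cnt = [0,0,0]
--     i = 0
--     while i != len(answers) :
--         if answers[i] == stu_1[i%len(stu_1)]:
--             stu_cnt[0] = stu_cnt[0] + 1
--         if answers[i] == stu_2[i%len(stu_2)]:
--             stu_cnt[1] = stu_cnt[1] + 1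
--         if answers[i] == stu_3[i%len(stu_3)]:
--             stu_cnt[2] = stu_cnt[2] + 1
--         i = i + 1
--     answer = find_max_index(stu_cnt)
--     return answer
--
-- def find_max_index(lst):
--     for _ in lst:
--         answer = []
--         max_value = max(lst)  # 리스트 내 가장 큰 값 구하기
--         answer.extend([index + 1for index, value in enumerate(lst) if value == max_value])
--     return answer
-- ===== SOURCE B (Python) =====
-- def solution(answers):
--     patterns = [[1, 2, 3, 4, 5],
--                 [2, 1, 2, 3, 2, 4, 2, 5],
--                 [3, 3, 1, 1, 2, 2, 4, 4, 5, 5]]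
--     # All three patterns have periods dividing 40, so one histogram of
--     # (position mod 40, answer) pairs determines every student's score:
--     # student with pattern p scores sum over residues r of freq[(r, p[r % len(p)])].
--     freq = {}
--     for i, a in enumerate(answers):
--         key = (i % 40, a)
--         freq[key] = freq.get(key, 0) + 1
--     scores = [sum(freq.get((r, p[r % len(p)]), 0) for r in range(40)) for p in patterns]
--     best = max(scores)
--     return [k + 1 for k, s in enumerate(scores) if s == best]
-- ===== Notes on version B (the rewrite author's own statement) =====
-- stated objective: alternative
-- what changed: Instead of comparing every answer against the three cyclic patterns (A's interleaved three-counter while-loop plus a redundant find_max_index helper), B builds one histogram of (index mod 40, answer) pairs in a single pass -- 40 being the lcm of the pattern periods -- and reads each student's score off the histogram with 40 lookups, then takes the argmax with an inlined max/enumerate comprehension.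
import Mathlib
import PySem

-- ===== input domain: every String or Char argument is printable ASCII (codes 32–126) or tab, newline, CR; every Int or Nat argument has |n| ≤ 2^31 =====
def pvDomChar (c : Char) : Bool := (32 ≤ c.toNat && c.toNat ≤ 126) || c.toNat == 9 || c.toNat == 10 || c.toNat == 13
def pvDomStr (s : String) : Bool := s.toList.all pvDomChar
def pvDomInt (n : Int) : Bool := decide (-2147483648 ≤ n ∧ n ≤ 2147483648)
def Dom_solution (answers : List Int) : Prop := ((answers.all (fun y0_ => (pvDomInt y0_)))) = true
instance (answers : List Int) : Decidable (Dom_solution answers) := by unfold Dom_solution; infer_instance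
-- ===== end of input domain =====

-- B replaces A's answer-by-answer comparison against the three cyclic patterns by one
-- histogram of (index mod 40, answer) pairs (40 = lcm of the pattern periods), reading
-- each student's score off the histogram with 40 lookups; same O(n) cost, different algorithm.

-- ===== PORT A =====
-- find_max_index: 'for _ in lst' recomputes the same answer each iteration
-- (max(lst) is exact here: lst is always the non-empty [c1,c2,c3])
def find_max_index (lst : List Int) : List Int :=
  lst.foldl (fun _ _ =>
    let maxValue := (PySem.List.max? lst (fun y => y)).getD 0
    ((PySem.List.enumerate lst 0).filter (fun p => p.2 == maxValue)).map (fun p => p.1 + 1)) []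

-- the while loop 'i = 0; while i != len(answers)' visits exactly i = 0..len-1,
-- so it is the fold over pyRange 0 len 1; answers[i]/stu[i%len] are in range
def solution (answers : List Int) : List Int :=
  let stu1 : List Int := [1, 2, 3, 4, 5]
  let stu2 : List Int := [2, 1, 2, 3, 2, 4, 2, 5]
  let stu3 : List Int := [3, 3, 1, 1, 2, 2, 4, 4, 5, 5]
  let cnt : Int × Int × Int :=
    (PySem.List.pyRange 0 (answers.length : Int) 1).foldl
      (fun c i =>
        (if PySem.List.pyGetD answers i 0 == PySem.List.pyGetD stu1 (PySem.Int.mod i 5) 0 then c.1 + 1 else c.1,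
         if PySem.List.pyGetD answers i 0 == PySem.List.pyGetD stu2 (PySem.Int.mod i 8) 0 then c.2.1 + 1 else c.2.1,
         if PySem.List.pyGetD answers i 0 == PySem.List.pyGetD stu3 (PySem.Int.mod i 10) 0 then c.2.2 + 1 else c.2.2))
      (0, 0, 0)
  find_max_index [cnt.1, cnt.2.1, cnt.2.2]

-- ===== PORT B =====
-- 'for i, a in enumerate(answers): freq[(i%40, a)] = freq.get((i%40, a), 0) + 1'
def freqB (answers : List Int) : PySem.Dict (Int × Int) Int :=
  (PySem.List.enumerate answers 0).foldl
    (fun d q => d.insert (PySem.Int.mod q.1 40, q.2) (d.getD (PySem.Int.mod q.1 40, q.2) 0 + 1))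
    PySem.Dict.empty

-- 'sum(freq.get((r, p[r % len(p)]), 0) for r in range(40))'
def scoreB (freq : PySem.Dict (Int × Int) Int) (p : List Int) : Int :=
  (PySem.List.pyRange 0 40 1).foldl
    (fun s r => s + freq.getD (r, PySem.List.pyGetD p (PySem.Int.mod r (p.length : Int)) 0) 0) 0

def solution_alt (answers : List Int) : List Int :=
  let patterns : List (List Int) :=
    [[1, 2, 3, 4, 5], [2, 1, 2, 3, 2, 4, 2, 5], [3, 3, 1, 1, 2, 2, 4, 4, 5, 5]]
  let freq := freqB answers
  let scores := patterns.map (fun p => scoreB freq p)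
  let best := (PySem.List.max? scores (fun y => y)).getD 0
  ((PySem.List.enumerate scores 0).filter (fun q => q.2 == best)).map (fun q => q.1 + 1)

-- ===== PRECONDITION & SPEC =====
def Spec_solution (answers : List Int) (out : List Int) : Prop := out = solution_alt answers
instance (answers : List Int) (out : List Int) : Decidable (Spec_solution answers out) := by unfold Spec_solution; infer_instance

-- ===== CLAIM (what is proved, stated in full; the proofs are below) =====
def Claim_equal_solution : Prop := ∀ (answers : List Int), Dom_solution answers → Spec_solution answers (solution answers)

-- ===== LEMMAS AND PROOFS =====

-- a fold whose step increments the three components independently splits into three folds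
theorem foldl_prod3 {α : Type} (l : List α) (g1 g2 g3 : α → Bool) (a b c : Int) :
    l.foldl (fun s x => (if g1 x = true then s.1 + 1 else s.1,
                         if g2 x = true then s.2.1 + 1 else s.2.1,
                         if g3 x = true then s.2.2 + 1 else s.2.2)) (a, b, c)
      = (l.foldl (fun s x => if g1 x = true then s + 1 else s) a,
         l.foldl (fun s x => if g2 x = true then s + 1 else s) b,
         l.foldl (fun s x => if g3 x = true then s + 1 else s) c) := by
  induction l generalizing a b c with
  | nil => rfl
  | cons h t ih => simp only [List.foldl_cons, ih]

-- the indicator sum over a list avoiding m is 0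
theorem ind_sum_zero (g : Int → Int) (m v : Int) (R : List Int) (hm : m ∉ R) :
    (R.map (fun r => if ((m, v) : Int × Int) = (r, g r) then (1 : Int) else 0)).sum = 0 := by
  induction R with
  | nil => rfl
  | cons r t ih =>
    simp only [List.mem_cons, not_or] at hm
    have hne : ¬ ((m, v) : Int × Int) = (r, g r) := by
      intro h; exact hm.1 (congrArg Prod.fst h)
    rw [List.map_cons, List.sum_cons, if_neg hne, zero_add]
    exact ih hm.2

-- the indicator sum over a duplicate-free list containing m picks out exactly r = m
theorem ind_sum (g : Int → Int) (m v : Int) (R : List Int) (hnd : R.Nodup) (hm : m ∈ R) :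
    (R.map (fun r => if ((m, v) : Int × Int) = (r, g r) then (1 : Int) else 0)).sum
      = if v = g m then 1 else 0 := by
  induction R with
  | nil => cases hm
  | cons r t ih =>
    rcases List.nodup_cons.mp hnd with ⟨hrt, hndt⟩
    rcases List.mem_cons.mp hm with h | h
    · subst h
      rw [List.map_cons, List.sum_cons, ind_sum_zero g m v t hrt, add_zero]
      by_cases hv : v = g m
      · rw [if_pos (by rw [hv]), if_pos hv]
      · rw [if_neg (fun he => hv (congrArg Prod.snd he)), if_neg hv]
    · have hmr : m ≠ r := fun he => hrt (he ▸ h)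
      rw [List.map_cons, List.sum_cons,
          if_neg (fun he => hmr (congrArg Prod.fst he)), zero_add]
      exact ih hndt h

-- summing, over the 40 residues, the counts of (r, g r) in the keyed list equals
-- counting the pairs whose value matches g at their residue
theorem count_sum (g : Int → Int) (l : List (Int × Int)) :
    ((PySem.List.pyRange 0 40 1).map
        (fun r => ((l.map (fun q => (PySem.Int.mod q.1 40, q.2))).count (r, g r) : Int))).sum
      = (l.countP (fun q => q.2 == g (PySem.Int.mod q.1 40)) : Int) := by
  induction l with
  | nil => simp
  | cons q t ih =>
    have hcnt : ∀ r ∈ PySem.List.pyRange 0 40 1,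
        (((q :: t).map (fun q => (PySem.Int.mod q.1 40, q.2))).count (r, g r) : Int)
          = ((t.map (fun q => (PySem.Int.mod q.1 40, q.2))).count (r, g r) : Int)
            + (if ((PySem.Int.mod q.1 40, q.2) : Int × Int) = (r, g r) then (1 : Int) else 0) := by
      intro r _
      rw [List.map_cons, List.count_cons]
      push_cast
      by_cases h : ((PySem.Int.mod q.1 40, q.2) : Int × Int) = (r, g r)
      · rw [if_pos h, if_pos (by exact_mod_cast beq_iff_eq.mpr h)]
      · rw [if_neg h, if_neg (by simpa [beq_iff_eq] using h)]
    rw [List.map_congr_left hcnt, PySem.List.sum_map_add_int, ih,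
        ind_sum g (PySem.Int.mod q.1 40) q.2 _
          (PySem.List.nodup_pyRange_one 0 40)
          (PySem.List.mem_pyRange_one.mpr
            ⟨PySem.Int.mod_nonneg _ (by norm_num), PySem.Int.mod_lt _ (by norm_num)⟩),
        List.countP_cons]
    push_cast
    by_cases h : q.2 = g (PySem.Int.mod q.1 40)
    · rw [if_pos h, if_pos (by exact beq_iff_eq.mpr h)]
    · rw [if_neg h, if_neg (by simpa [beq_iff_eq] using h)]

-- residues compose: (i % 40) % L = i % L when 0 < L and L | 40
theorem modmod (L : Int) (hL : 0 < L) (hdvd : L ∣ 40) (i : Int) :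
    PySem.Int.mod (PySem.Int.mod i 40) L = PySem.Int.mod i L := by
  rw [PySem.Int.mod_eq_emod_of_pos (by norm_num : (0:Int) < 40),
      PySem.Int.mod_eq_emod_of_pos hL, PySem.Int.mod_eq_emod_of_pos hL]
  exact Int.emod_emod_of_dvd i hdvd

-- B's histogram is the counter of the keyed enumeration
theorem freqB_eq_counter (answers : List Int) :
    freqB answers
      = PySem.Dict.counter ((PySem.List.enumerate answers 0).map
          (fun q => (PySem.Int.mod q.1 40, q.2))) := by
  rw [freqB, ← PySem.Dict.foldl_insert_getD_add_one_eq_counter, List.foldl_map]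

-- B's histogram-read score equals A's direct per-pattern match count
theorem scoreB_eq (answers p : List Int) (hL : 0 < (p.length : Int)) (hdvd : (p.length : Int) ∣ 40) :
    scoreB (freqB answers) p
      = (PySem.List.pyRange 0 (answers.length : Int) 1).foldl
          (fun s i => if PySem.List.pyGetD answers i 0
              == PySem.List.pyGetD p (PySem.Int.mod i (p.length : Int)) 0 then s + 1 else s) 0 := by
  rw [scoreB, PySem.List.foldl_add, zero_add, freqB_eq_counter]
  have hgetD : ∀ r ∈ PySem.List.pyRange 0 40 1,
      (PySem.Dict.counter ((PySem.List.enumerate answers 0).map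
          (fun q => (PySem.Int.mod q.1 40, q.2)))).getD
        (r, PySem.List.pyGetD p (PySem.Int.mod r (p.length : Int)) 0) 0
      = (((PySem.List.enumerate answers 0).map (fun q => (PySem.Int.mod q.1 40, q.2))).count
          (r, PySem.List.pyGetD p (PySem.Int.mod r (p.length : Int)) 0) : Int) := by
    intro r _; exact PySem.Dict.getD_counter _ _
  rw [List.map_congr_left hgetD,
      count_sum (fun r => PySem.List.pyGetD p (PySem.Int.mod r (p.length : Int)) 0),
      PySem.List.enumerate_eq_map_pyRange (d := 0), List.countP_map,
      PySem.List.foldl_count_if, zero_add]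
  have hlen : PySem.List.len answers = (answers.length : Int) := by
    simp [PySem.List.len]
  rw [hlen]
  apply congrArg
  apply List.countP_congr
  intro j _
  simp only [Function.comp]
  rw [modmod _ hL hdvd j]

theorem solution_spec_aux (answers : List Int) : solution answers = solution_alt answers := by
  simp only [solution, solution_alt, find_max_index]
  rw [foldl_prod3]
  rw [List.map_cons, List.map_cons, List.map_cons, List.map_nil]
  rw [scoreB_eq answers _ (by norm_num) (by norm_num),
      scoreB_eq answers _ (by norm_num) (by norm_num),
      scoreB_eq answers _ (by norm_num) (by norm_num)]
  norm_num

-- ===== VERDICT (by name: the statement is the Claim_ definition above) =====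
theorem solution_spec : Claim_equal_solution := by
  intro answers _
  exact solution_spec_aux answers
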